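-- pv_equiv track=rewrite | github.com/lyubomirvelchev/My-Projects | 2048/Game2048_v2.py | check_list_state
-- ===== SOURCE A (Python) =====
-- def check_list_state(list): # check if all elements are on the right and all zeros on the left
--     zero_exist = False
--     for element in list:
--         if element == 0:
--             zero_exist = True
--         else:
--             if zero_exist: # check is there is a element != 0 that is behind the zero
--                 return True
--     return False
-- ===== SOURCE B (Python) =====
-- def check_list_state(list):
--     zeros = [i for i, x in enumerate(list) if x == 0]
--     nonzeros = [i for i, x in enumerate(list) if x != 0]
--     return bool(zeros and nonzeros and zeros[0] < nonzeros[-1])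
-- ===== Notes on version B (the rewrite author's own statement) =====
-- stated objective: alternative
-- what changed: Replaces the single-pass boolean-latch scan with a positional decomposition: collect the indices of zeros and of nonzeros, then return whether the first zero index precedes the last nonzero index.
import Mathlib
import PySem

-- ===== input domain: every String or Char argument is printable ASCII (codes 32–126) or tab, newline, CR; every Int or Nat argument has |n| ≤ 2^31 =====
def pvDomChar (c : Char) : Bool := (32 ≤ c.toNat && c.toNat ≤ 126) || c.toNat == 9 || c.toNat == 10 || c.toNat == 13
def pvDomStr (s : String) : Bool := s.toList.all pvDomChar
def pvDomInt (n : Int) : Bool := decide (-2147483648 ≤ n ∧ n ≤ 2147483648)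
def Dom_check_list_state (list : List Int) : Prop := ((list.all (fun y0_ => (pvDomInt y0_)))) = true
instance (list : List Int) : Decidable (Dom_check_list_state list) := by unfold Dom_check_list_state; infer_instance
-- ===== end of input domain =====

-- B replaces A's single-pass boolean-latch scan by collecting zero/nonzero index lists and
-- comparing the first zero index with the last nonzero index (alternative decomposition, same cost).

-- ===== PORT A =====
-- loop over the list with the zero_exist latch; early 'return True' modelled by the true branch
def checkLoopA : List Int → Bool → Bool
  | [], _ => false
  | x :: xs, zeroExist =>
    if x == 0 then checkLoopA xs true
    else if zeroExist then true
    else checkLoopA xs zeroExist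

def check_list_state (list : List Int) : Bool := checkLoopA list false

-- ===== PORT B =====
-- [i for i, x in enumerate(list) if x == 0], with n the running enumerate index
def zerosFrom (n : Int) : List Int → List Int
  | [] => []
  | x :: xs => if x == 0 then n :: zerosFrom (n + 1) xs else zerosFrom (n + 1) xs

-- [i for i, x in enumerate(list) if x != 0]
def nonzerosFrom (n : Int) : List Int → List Int
  | [] => []
  | x :: xs => if x != 0 then n :: nonzerosFrom (n + 1) xs else nonzerosFrom (n + 1) xs

def check_list_state_alt (list : List Int) : Bool :=
  let zeros := zerosFrom 0 list
  let nonzeros := nonzerosFrom 0 list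
  -- bool(zeros and nonzeros and zeros[0] < nonzeros[-1])
  match zeros.head?, nonzeros.getLast? with
  | some a, some b => decide (a < b)
  | _, _ => false

-- ===== PRECONDITION & SPEC =====
def Spec_check_list_state (list : List Int) (out : Bool) : Prop := out = check_list_state_alt list
instance (list : List Int) (out : Bool) : Decidable (Spec_check_list_state list out) := by unfold Spec_check_list_state; infer_instance

-- ===== CLAIM (what is proved, stated in full; the proofs are below) =====
def Claim_equal_check_list_state : Prop := ∀ (list : List Int), Dom_check_list_state list → Spec_check_list_state list (check_list_state list)

-- ===== LEMMAS AND PROOFS =====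

-- ===== VERDICT (by name: the statement is the Claim_ definition above) =====
-- B's body with the enumerate start index generalized to n
def bGen (n : Int) (l : List Int) : Bool :=
  match (zerosFrom n l).head?, (nonzerosFrom n l).getLast? with
  | some a, some b => decide (a < b)
  | _, _ => false

theorem zerosFrom_head_ge (n a : Int) (l : List Int)
    (h : (zerosFrom n l).head? = some a) : n ≤ a := by
  induction l generalizing n with
  | nil => simp [zerosFrom] at h
  | cons x xs ih =>
    simp only [zerosFrom] at h
    split at h
    · simp at h; omega
    · have := ih (n + 1) h; omega

theorem nonzerosFrom_last_ge (n b : Int) (l : List Int)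
    (h : (nonzerosFrom n l).getLast? = some b) : n ≤ b := by
  induction l generalizing n b with
  | nil => simp [nonzerosFrom] at h
  | cons x xs ih =>
    simp only [nonzerosFrom] at h
    split at h
    · rw [List.getLast?_cons] at h
      rcases hxs : (nonzerosFrom (n + 1) xs).getLast? with _ | c
      · rw [hxs] at h; simp at h; omega
      · rw [hxs] at h; simp at h
        have := ih (n + 1) c hxs; omega
    · have := ih (n + 1) b h; omega

theorem checkLoopA_true (n : Int) (l : List Int) :
    checkLoopA l true = !(nonzerosFrom n l).isEmpty := by
  induction l generalizing n with
  | nil => simp [checkLoopA, nonzerosFrom]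
  | cons x xs ih =>
    by_cases hx : x = 0
    · simp [checkLoopA, nonzerosFrom, hx, ih (n + 1)]
    · simp [checkLoopA, nonzerosFrom, hx]

theorem checkLoopA_eq_bGen (n : Int) (l : List Int) :
    checkLoopA l false = bGen n l := by
  induction l generalizing n with
  | nil => simp [checkLoopA, bGen, zerosFrom, nonzerosFrom]
  | cons x xs ih =>
    by_cases hx : x = 0
    · subst hx
      rcases hz : (nonzerosFrom (n + 1) xs).getLast? with _ | b
      · have he : nonzerosFrom (n + 1) xs = [] := List.getLast?_eq_none_iff.mp hz
        simp [checkLoopA, bGen, zerosFrom, nonzerosFrom, he,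
          checkLoopA_true (n + 1) xs]
      · have hb := nonzerosFrom_last_ge (n + 1) b xs hz
        have hne : nonzerosFrom (n + 1) xs ≠ [] := by
          intro h; rw [h] at hz; simp at hz
        have hie : (nonzerosFrom (n + 1) xs).isEmpty = false := by
          simp [hne]
        simp [checkLoopA, bGen, zerosFrom, nonzerosFrom, hz,
          checkLoopA_true (n + 1) xs, hie]
        omega
    · rcases hzz : (zerosFrom (n + 1) xs).head? with _ | a
      · simp [checkLoopA, bGen, zerosFrom, nonzerosFrom, hx, hzz, ih (n + 1)]
      · have ha := zerosFrom_head_ge (n + 1) a xs hzz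
        rcases hnz : (nonzerosFrom (n + 1) xs).getLast? with _ | b
        · have he : nonzerosFrom (n + 1) xs = [] := List.getLast?_eq_none_iff.mp hnz
          simp [checkLoopA, bGen, zerosFrom, nonzerosFrom, hx, hzz, he,
            ih (n + 1)]
          omega
        · simp [checkLoopA, bGen, zerosFrom, nonzerosFrom, hx, hzz, hnz,
            ih (n + 1), List.getLast?_cons]

theorem check_list_state_spec : Claim_equal_check_list_state := by
  intro l _
  unfold Spec_check_list_state check_list_state check_list_state_alt
  exact checkLoopA_eq_bGen 0 l
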